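-- pv_equiv track=rewrite | github.com/leobigboy/Final_project | phsn/Ex2.py | count_p_max
-- ===== SOURCE A (Python) =====
-- def count_p_max(n, k):
--     """
--     Hàm tính số phân hoạch p_max(n, k)
--     Đếm số cách phân hoạch n có phần tử lớn nhất là k
--     """
--     if n < k or k <= 0:
--         return 0  # Không thể có phân hoạch
--     if n == k:
--         return 1  # Chỉ có một phân hoạch là {k}
--
--     target = n - k  # Bài toán quy về: phân hoạch số `target` với các phần tử <= k
--
--     # Bảng quy hoạch động: dp[i][j] là số cách phân hoạch số i với các phần tử <= j
--     dp = [[0] * (k + 1) for _ in range(target + 1)]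
--
--     # Trường hợp cơ sở: có 1 cách để phân hoạch số 0 (là phân hoạch rỗng)
--     for j in range(k + 1):
--         dp[0][j] = 1
--
--     # Điền bảng quy hoạch động
--     for i in range(1, target + 1):
--         for j in range(1, k + 1):
--             # Cách 1: Không dùng phần tử j. Số cách bằng phân hoạch i với các phần tử <= j-1
--             dp[i][j] = dp[i][j - 1]
--
--             # Cách 2: Dùng ít nhất một phần tử j
--             if i >= j:
--                 dp[i][j] += dp[i - j][j]
--
--     return dp[target][k]
-- ===== SOURCE B (Python) =====
-- def count_p_max(n, k):
--     """
--     Count partitions of n whose largest part is exactly k.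
--     Same guards as the original; the remainder target = n - k is counted via
--     the CONJUGATE view: partitions of target with parts <= k correspond to
--     partitions of target into at most k parts.  Row m holds
--     E(r, m) = number of partitions of r into EXACTLY m parts, with the
--     delete-a-1 / subtract-1-from-each-part recurrence
--         E(r, m) = E(r-1, m-1) + E(r-m, m),
--     keeping only the previous row and a running total of E(target, m).
--     """
--     if n < k or k <= 0:
--         return 0
--     if n == k:
--         return 1
--
--     target = n - k
--     prev = [1] + [0] * target          # row m = 0: E(r, 0) = (r == 0)
--     total = prev[target]
--     for m in range(1, k + 1):
--         cur = [0] * (target + 1)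
--         for r in range(m, target + 1):
--             cur[r] = prev[r - 1] + cur[r - m]
--         total += cur[target]
--         prev = cur
--     return total
-- ===== Notes on version B (the rewrite author's own statement) =====
-- stated objective: alternative
-- what changed: B counts the conjugate partitions: instead of A's 2D use/skip table dp[i][j] over 'parts <= j', it iterates over the number of parts m with the delete-a-1/subtract-1-from-each-part recurrence E(r,m)=E(r-1,m-1)+E(r-m,m), keeping a single previous row and a running total of E(target,m).
import Mathlib
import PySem

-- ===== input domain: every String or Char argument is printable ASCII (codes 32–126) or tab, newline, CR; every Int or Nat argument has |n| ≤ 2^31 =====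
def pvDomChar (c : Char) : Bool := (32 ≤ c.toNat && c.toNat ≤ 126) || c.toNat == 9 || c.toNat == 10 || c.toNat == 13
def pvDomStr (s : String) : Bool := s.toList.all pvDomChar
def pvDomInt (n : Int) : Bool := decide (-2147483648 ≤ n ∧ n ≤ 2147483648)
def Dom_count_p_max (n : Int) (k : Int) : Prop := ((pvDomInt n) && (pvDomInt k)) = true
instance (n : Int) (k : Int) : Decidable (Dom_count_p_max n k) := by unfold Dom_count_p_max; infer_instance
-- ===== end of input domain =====

-- B counts the CONJUGATE partitions: rows indexed by the number of parts m with the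
-- recurrence E(r,m) = E(r-1,m-1) + E(r-m,m) (delete a 1 / subtract 1 from each part),
-- one previous row kept and a running total — instead of A's use/skip 2D table over
-- 'parts <= j' (objective: alternative).

-- ===== PORT A =====
def count_p_max (n : Int) (k : Int) : Int :=
  if n < k ∨ k ≤ 0 then 0
  else if n = k then 1
  else
    let target := n - k
    -- dp = [[0] * (k + 1) for _ in range(target + 1)]
    let dp : List (List Int) :=
      (PySem.List.pyRange 0 (target + 1) 1).map (fun _ => PySem.List.pyRepeat [(0 : Int)] (k + 1))
    -- for j in range(k + 1): dp[0][j] = 1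
    let dp := (PySem.List.pyRange 0 (k + 1) 1).foldl
      (fun dp j => PySem.List.pySetD dp 0 (PySem.List.pySetD (PySem.List.pyGetD dp 0 []) j 1)) dp
    -- for i in range(1, target + 1): for j in range(1, k + 1): ...
    let dp := (PySem.List.pyRange 1 (target + 1) 1).foldl (fun dp i =>
      (PySem.List.pyRange 1 (k + 1) 1).foldl (fun dp j =>
        -- dp[i][j] = dp[i][j - 1]
        let dp := PySem.List.pySetD dp i
          (PySem.List.pySetD (PySem.List.pyGetD dp i [])
            j (PySem.List.pyGetD (PySem.List.pyGetD dp i []) (j - 1) 0))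
        -- if i >= j: dp[i][j] += dp[i - j][j]
        if j ≤ i then
          PySem.List.pySetD dp i
            (PySem.List.pySetD (PySem.List.pyGetD dp i []) j
              (PySem.List.pyGetD (PySem.List.pyGetD dp i []) j 0 +
               PySem.List.pyGetD (PySem.List.pyGetD dp (i - j) []) j 0))
        else dp) dp) dp
    PySem.List.pyGetD (PySem.List.pyGetD dp target []) k 0

-- ===== PORT B =====
def count_p_max_alt (n : Int) (k : Int) : Int :=
  if n < k ∨ k ≤ 0 then 0
  else if n = k then 1
  else
    let target := n - k
    -- prev = [1] + [0] * target
    let prev : List Int := [(1 : Int)] ++ PySem.List.pyRepeat [(0 : Int)] target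
    -- total = prev[target]   (target is in range here, so getD reads the same cell)
    let total := PySem.List.pyGetD prev target 0
    -- for m in range(1, k + 1):
    --   cur = [0] * (target + 1)
    --   for r in range(m, target + 1): cur[r] = prev[r - 1] + cur[r - m]
    --   total += cur[target]; prev = cur
    let st := (PySem.List.pyRange 1 (k + 1) 1).foldl (fun (st : Int × List Int) m =>
      let cur : List Int := PySem.List.pyRepeat [(0 : Int)] (target + 1)
      let cur := (PySem.List.pyRange m (target + 1) 1).foldl (fun cur r =>
        PySem.List.pySetD cur r
          (PySem.List.pyGetD st.2 (r - 1) 0 + PySem.List.pyGetD cur (r - m) 0)) cur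
      (st.1 + PySem.List.pyGetD cur target 0, cur)) (total, prev)
    st.1

-- ===== PRECONDITION & SPEC =====
def Spec_count_p_max (n : Int) (k : Int) (out : Int) : Prop := out = count_p_max_alt n k
instance (n : Int) (k : Int) (out : Int) : Decidable (Spec_count_p_max n k out) := by unfold Spec_count_p_max; infer_instance

-- ===== CLAIM (what is proved, stated in full; the proofs are below) =====
def Claim_equal_count_p_max : Prop := ∀ (n : Int) (k : Int), Dom_count_p_max n k → Spec_count_p_max n k (count_p_max n k)

-- ===== LEMMAS AND PROOFS =====

-- Number of partitions of i into parts ≤ j (the quantity A's table computes).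
def pvP : Nat → Nat → Int
  | 0, _ => 1
  | _ + 1, 0 => 0
  | i + 1, j + 1 => pvP (i + 1) j + (if j + 1 ≤ i + 1 then pvP (i - j) (j + 1) else 0)
termination_by i j => (i, j)
decreasing_by
  · exact Prod.Lex.right _ (Nat.lt_succ_self j)
  · exact Prod.Lex.left _ _ (Nat.lt_succ_of_le (Nat.sub_le i j))

lemma pvP_zero (j : Nat) : pvP 0 j = 1 := by cases j <;> simp [pvP]

lemma pvP_succ_zero (i : Nat) : pvP (i + 1) 0 = 0 := by simp [pvP]

lemma pvP_rec (i j : Nat) :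
    pvP (i + 1) (j + 1) = pvP (i + 1) j + (if j + 1 ≤ i + 1 then pvP (i - j) (j + 1) else 0) := by
  simp [pvP]

lemma pvP_stab (i j : Nat) (h : i ≤ j) : pvP i (j + 1) = pvP i j := by
  cases i with
  | zero => simp [pvP_zero]
  | succ i' =>
    rw [pvP_rec]
    have : ¬ (j + 1 ≤ i' + 1) := by omega
    simp [this]

lemma pvP_split (m c : Nat) (hc : 1 ≤ c) (hm : c ≤ m) :
    pvP m c = pvP m (c - 1) + pvP (m - c) c := by
  obtain ⟨m', rfl⟩ : ∃ m', m = m' + 1 := ⟨m - 1, by omega⟩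
  obtain ⟨c', rfl⟩ : ∃ c', c = c' + 1 := ⟨c - 1, by omega⟩
  rw [pvP_rec]
  have h1 : c' + 1 ≤ m' + 1 := hm
  simp [h1]

-- Number of partitions of r into EXACTLY m parts (the quantity B's rows compute).
def pvE : Nat → Nat → Int
  | r, 0 => if r = 0 then 1 else 0
  | r, m + 1 => if r < m + 1 then 0 else pvE (r - 1) m + pvE (r - (m + 1)) (m + 1)
termination_by r m => (m, r)
decreasing_by
  · exact Prod.Lex.left _ _ (Nat.lt_succ_self m)
  · exact Prod.Lex.right _ (by omega)

lemma pvE_lt (r m : Nat) (h : r < m) : pvE r m = 0 := by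
  cases m with
  | zero => omega
  | succ m' => rw [pvE]; simp [h]

lemma pvE_split (r m : Nat) (h1 : 1 ≤ m) (h2 : m ≤ r) :
    pvE r m = pvE (r - 1) (m - 1) + pvE (r - m) m := by
  obtain ⟨m', rfl⟩ : ∃ m', m = m' + 1 := ⟨m - 1, by omega⟩
  rw [pvE]
  simp [show ¬ r < m' + 1 by omega]

-- Conjugation identity: E(r, m) = Σ_{i ≤ m} E(r - m, i)  (subtract 1 from each part).
lemma pvE_conj (r : Nat) : ∀ m : Nat, m ≤ r →
    pvE r m = ((List.range (m + 1)).map (fun i => pvE (r - m) i)).sum := by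
  induction r using Nat.strong_induction_on with
  | _ r ih =>
    intro m hm
    cases m with
    | zero => simp
    | succ m' =>
      rw [pvE_split r (m' + 1) (by omega) hm]
      have h1 : pvE (r - 1) m' = ((List.range (m' + 1)).map (fun i => pvE (r - 1 - m') i)).sum :=
        ih (r - 1) (by omega) m' (by omega)
      have h2 : r - 1 - m' = r - (m' + 1) := by omega
      rw [show (m' + 1) - 1 = m' by omega, h1, h2]
      conv_rhs => rw [List.range_succ]
      rw [List.map_append, List.sum_append]
      simp

-- Σ_{m ≤ K} E(r, m) = P(r, K): partitions into at most K parts = partitions with parts ≤ K.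
lemma pvT_eq_pvP : ∀ K : Nat, ∀ r : Nat,
    ((List.range (K + 1)).map (fun m => pvE r m)).sum = pvP r K := by
  intro K
  induction K with
  | zero =>
    intro r
    cases r with
    | zero => simp [pvE, pvP_zero]
    | succ r' => simp [pvE, pvP_succ_zero]
  | succ K ihK =>
    intro r
    induction r using Nat.strong_induction_on with
    | _ r ih =>
      rw [List.range_succ, List.map_append, List.sum_append]
      simp only [List.map_cons, List.map_nil, List.sum_cons, List.sum_nil, add_zero]
      rw [ihK r]
      by_cases h : K + 1 ≤ r
      · rw [pvE_conj r (K + 1) h, ih (r - (K + 1)) (by omega),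
            pvP_split r (K + 1) (by omega) h]
        simp
      · rw [pvE_lt r (K + 1) (by omega), pvP_stab r K (by omega)]
        simp

lemma pv_getD_map_range {α : Type} (f : Nat → α) (n m : Nat) (d : α) (h : m < n) :
    PySem.List.pyGetD ((List.range n).map f) (m : Int) d = f m := by
  simp [PySem.List.pyGetD_natCast, List.getD_eq_getElem?_getD, h]

lemma pv_setD_map_range {α : Type} (f : Nat → α) (n m : Nat) (v : α) (h : m < n) :
    PySem.List.pySetD ((List.range n).map f) (m : Int) v
      = (List.range n).map (fun a => if a = m then v else f a) := by
  rw [PySem.List.pySetD_natCast]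
  apply List.ext_getElem
  · simp
  · intro i h1 h2
    simp only [List.getElem_set, List.getElem_map, List.getElem_range] at *
    rcases eq_or_ne i m with rfl | hne
    · simp
    · simp [hne, Ne.symm hne]

-- B side, inner loop: filling row m from the fixed previous row (m - 1).
lemma pvB_inner (t m : Nat) (hm : 1 ≤ m) :
    ∀ (d pos : Nat), m ≤ pos → t + 1 - pos ≤ d →
    (PySem.List.pyRange (pos : Int) ((t : Int) + 1) 1).foldl
      (fun cur r => PySem.List.pySetD cur r
        (PySem.List.pyGetD ((List.range (t + 1)).map (fun a => pvE a (m - 1))) (r - 1) 0 +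
         PySem.List.pyGetD cur (r - (m : Int)) 0))
      ((List.range (t + 1)).map (fun a => if a < pos then pvE a m else 0))
    = (List.range (t + 1)).map (fun a => pvE a m) := by
  intro d
  induction d with
  | zero =>
    intro pos hmp hd
    rw [PySem.List.pyRange_one_eq_nil (by exact_mod_cast (by omega : (t : Int) + 1 ≤ (pos : Int)))]
    simp only [List.foldl_nil]
    apply List.map_congr_left
    intro a ha
    rw [List.mem_range] at ha
    simp [show a < pos by omega]
  | succ d ih =>
    intro pos hmp hd
    by_cases hpt : t + 1 ≤ pos
    · rw [PySem.List.pyRange_one_eq_nil (by exact_mod_cast (by omega : (t : Int) + 1 ≤ (pos : Int)))]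
      simp only [List.foldl_nil]
      apply List.map_congr_left
      intro a ha
      rw [List.mem_range] at ha
      simp [show a < pos by omega]
    · have hpt' : pos < t + 1 := by omega
      rw [PySem.List.pyRange_one_cons (by exact_mod_cast hpt')]
      simp only [List.foldl_cons]
      rw [show (pos : Int) - 1 = ((pos - 1 : Nat) : Int) by rw [Nat.cast_sub (by omega)]; norm_num,
          pv_getD_map_range _ _ _ _ (show pos - 1 < t + 1 by omega),
          show (pos : Int) - (m : Int) = ((pos - m : Nat) : Int) by rw [Nat.cast_sub hmp],
          pv_getD_map_range _ _ _ _ (show pos - m < t + 1 by omega),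
          pv_setD_map_range _ _ _ _ hpt']
      have hstep : (List.range (t + 1)).map (fun a =>
          if a = pos then pvE (pos - 1) (m - 1) + (if pos - m < pos then pvE (pos - m) m else 0)
          else if a < pos then pvE a m else 0)
          = (List.range (t + 1)).map (fun a => if a < pos + 1 then pvE a m else 0) := by
        apply List.map_congr_left
        intro a ha
        rcases eq_or_ne a pos with rfl | hne
        · simp [show a - m < a by omega, show a < a + 1 by omega,
            ← pvE_split a m hm (by omega)]
        · by_cases h2 : a < pos
          · simp [hne, h2, show a < pos + 1 by omega]
          · simp [hne, h2, show ¬ a < pos + 1 by omega]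
      rw [hstep, show (pos : Int) + 1 = ((pos + 1 : Nat) : Int) by push_cast; ring]
      exact ih (pos + 1) (by omega) (by omega)

lemma pvB_repl (t : Nat) (m : Nat) :
    List.replicate (t + 1) (0 : Int)
      = (List.range (t + 1)).map (fun a => if a < m then pvE a m else 0) := by
  apply List.ext_getElem
  · simp
  · intro i h1 h2
    simp only [List.getElem_replicate, List.getElem_map, List.getElem_range]
    by_cases h : i < m
    · rw [if_pos h, pvE_lt i m h]
    · rw [if_neg h]

-- B side, outer loop: after parts counted up to M, state = (Σ_{m ≤ M} E(t, m), row M).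
lemma pvB_outer (t : Nat) : ∀ K : Nat,
    (PySem.List.pyRange 1 ((K : Int) + 1) 1).foldl (fun (st : Int × List Int) m =>
      (st.1 + PySem.List.pyGetD
          ((PySem.List.pyRange m ((t : Int) + 1) 1).foldl (fun cur r =>
            PySem.List.pySetD cur r
              (PySem.List.pyGetD st.2 (r - 1) 0 + PySem.List.pyGetD cur (r - m) 0))
            (PySem.List.pyRepeat [(0 : Int)] ((t : Int) + 1))) (t : Int) 0,
       (PySem.List.pyRange m ((t : Int) + 1) 1).foldl (fun cur r =>
            PySem.List.pySetD cur r
              (PySem.List.pyGetD st.2 (r - 1) 0 + PySem.List.pyGetD cur (r - m) 0))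
            (PySem.List.pyRepeat [(0 : Int)] ((t : Int) + 1))))
      (pvE t 0, (List.range (t + 1)).map (fun a => pvE a 0))
    = (((List.range (K + 1)).map (fun m => pvE t m)).sum,
       (List.range (t + 1)).map (fun a => pvE a K)) := by
  intro K
  induction K with
  | zero =>
    rw [show ((0 : Nat) : Int) + 1 = 1 by norm_num, PySem.List.pyRange_one_eq_nil le_rfl]
    simp
  | succ K ih =>
    rw [show (((K + 1 : Nat)) : Int) + 1 = ((K : Int) + 1) + 1 by push_cast; ring,
        PySem.List.pyRange_one_succ_right (by omega : (1 : Int) ≤ (K : Int) + 1),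
        List.foldl_append, ih]
    simp only [List.foldl_cons, List.foldl_nil]
    have hrepl : PySem.List.pyRepeat [(0 : Int)] ((t : Int) + 1)
        = (List.range (t + 1)).map (fun a => if a < K + 1 then pvE a (K + 1) else 0) := by
      rw [PySem.List.pyRepeat_singleton, show ((t : Int) + 1).toNat = t + 1 by omega]
      exact pvB_repl t (K + 1)
    have hinner := pvB_inner t (K + 1) (by omega) (t + 1) (K + 1) le_rfl (by omega)
    rw [show ((K + 1 : Nat) : Int) = (K : Int) + 1 by push_cast; ring,
        show (K + 1) - 1 = K by omega] at hinner
    simp only [hrepl]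
    rw [hinner, pv_getD_map_range _ _ _ _ (by omega : t < t + 1)]
    rw [List.range_succ (n := K + 1), List.map_append, List.sum_append]
    simp

lemma pvB_init (T : Nat) :
    (1 : Int) :: List.replicate T (0 : Int) = (List.range (T + 1)).map (fun a => pvE a 0) := by
  rw [List.range_succ_eq_map, List.map_cons, List.map_map]
  simp [pvE, Function.comp_def]

lemma pvB_eval (n k : Int) (h1 : ¬(n < k ∨ k ≤ 0)) (h2 : ¬ n = k) :
    count_p_max_alt n k = pvP (n - k).toNat k.toNat := by
  have hkK : k = ((k.toNat : Nat) : Int) := (Int.toNat_of_nonneg (by omega)).symm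
  have htT : n - k = (((n - k).toNat : Nat) : Int) := (Int.toNat_of_nonneg (by omega)).symm
  simp only [count_p_max_alt, h1, h2, if_false]
  obtain ⟨T, hT⟩ : ∃ T : Nat, n - k = (T : Int) := ⟨(n - k).toNat, htT⟩
  obtain ⟨K, hK⟩ : ∃ K : Nat, k = (K : Int) := ⟨k.toNat, hkK⟩
  rw [hT, hK, Int.toNat_natCast, Int.toNat_natCast]
  have hprev : ([(1 : Int)] ++ PySem.List.pyRepeat [(0 : Int)] (T : Int))
      = (List.range (T + 1)).map (fun a => pvE a 0) := by
    rw [PySem.List.pyRepeat_singleton, show ((T : Int)).toNat = T by omega]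
    exact pvB_init T
  rw [hprev, pv_getD_map_range _ _ _ _ (by omega : T < T + 1), pvB_outer T K]
  exact pvT_eq_pvP K T

-- A side: states of the 2D table.
def pvRowF (K i : Nat) : List Int := (List.range (K + 1)).map (fun j => pvP i j)
def pvRowP (K i m : Nat) : List Int := (List.range (K + 1)).map (fun j => if j < m then pvP i j else 0)
def pvStB (t K r m : Nat) : List (List Int) :=
  (List.range (t + 1)).map (fun i' =>
    if i' < r then pvRowF K i' else if i' = r then pvRowP K r m else List.replicate (K + 1) (0 : Int))
def pvStA (t K r : Nat) : List (List Int) :=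
  (List.range (t + 1)).map (fun i' => if i' < r then pvRowF K i' else List.replicate (K + 1) (0 : Int))

lemma pvRowP_full (K i m : Nat) (hm : K + 1 ≤ m) : pvRowP K i m = pvRowF K i := by
  apply List.map_congr_left
  intro j hj
  rw [List.mem_range] at hj
  simp [show j < m by omega]

lemma pvA_inner (t K r : Nat) (hr1 : 1 ≤ r) (hrt : r ≤ t) :
    ∀ (d m : Nat), 1 ≤ m → K + 1 - m ≤ d →
    (PySem.List.pyRange (m : Int) ((K : Int) + 1) 1).foldl (fun dp j =>
        if j ≤ (r : Int) then
          PySem.List.pySetD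
            (PySem.List.pySetD dp (r : Int)
              (PySem.List.pySetD (PySem.List.pyGetD dp (r : Int) [])
                j (PySem.List.pyGetD (PySem.List.pyGetD dp (r : Int) []) (j - 1) 0)))
            (r : Int)
            (PySem.List.pySetD
              (PySem.List.pyGetD
                (PySem.List.pySetD dp (r : Int)
                  (PySem.List.pySetD (PySem.List.pyGetD dp (r : Int) [])
                    j (PySem.List.pyGetD (PySem.List.pyGetD dp (r : Int) []) (j - 1) 0)))
                (r : Int) [])
              j
              (PySem.List.pyGetD
                  (PySem.List.pyGetD
                    (PySem.List.pySetD dp (r : Int)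
                      (PySem.List.pySetD (PySem.List.pyGetD dp (r : Int) [])
                        j (PySem.List.pyGetD (PySem.List.pyGetD dp (r : Int) []) (j - 1) 0)))
                    (r : Int) [])
                  j 0 +
                PySem.List.pyGetD
                  (PySem.List.pyGetD
                    (PySem.List.pySetD dp (r : Int)
                      (PySem.List.pySetD (PySem.List.pyGetD dp (r : Int) [])
                        j (PySem.List.pyGetD (PySem.List.pyGetD dp (r : Int) []) (j - 1) 0)))
                    ((r : Int) - j) [])
                  j 0))
        else
          PySem.List.pySetD dp (r : Int)
            (PySem.List.pySetD (PySem.List.pyGetD dp (r : Int) [])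
              j (PySem.List.pyGetD (PySem.List.pyGetD dp (r : Int) []) (j - 1) 0))) (pvStB t K r m)
    = pvStB t K r (K + 1) := by
  intro d
  induction d with
  | zero =>
    intro m hm1 hd
    rw [PySem.List.pyRange_one_eq_nil (by exact_mod_cast (by omega : (K : Int) + 1 ≤ (m : Int)))]
    simp only [List.foldl_nil, pvStB, pvRowP_full K r m (by omega), pvRowP_full K r (K + 1) le_rfl]
  | succ d ih =>
    intro m hm1 hd
    by_cases hmK : K + 1 ≤ m
    · rw [PySem.List.pyRange_one_eq_nil (by exact_mod_cast (by omega : (K : Int) + 1 ≤ (m : Int)))]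
      simp only [List.foldl_nil, pvStB, pvRowP_full K r m hmK, pvRowP_full K r (K + 1) le_rfl]
    · have hmK' : m < K + 1 := by omega
      rw [PySem.List.pyRange_one_cons (by exact_mod_cast hmK')]
      simp only [List.foldl_cons]
      have hrt' : r < t + 1 := by omega
      -- step 1: dp[r][m] = dp[r][m-1]
      have e1 : PySem.List.pyGetD (pvStB t K r m) (r : Int) [] = pvRowP K r m := by
        rw [pvStB, pv_getD_map_range _ _ _ _ hrt']
        simp
      have e2 : PySem.List.pyGetD (pvRowP K r m) ((m : Int) - 1) 0 = pvP r (m - 1) := by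
        rw [show (m : Int) - 1 = ((m - 1 : Nat) : Int) by rw [Nat.cast_sub hm1]; norm_num,
            pvRowP, pv_getD_map_range _ _ _ _ (by omega : m - 1 < K + 1)]
        simp [show m - 1 < m by omega]
      have hset1 : PySem.List.pySetD (pvRowP K r m) ((m : Int)) (pvP r (m - 1))
          = (List.range (K + 1)).map (fun j => if j = m then pvP r (m - 1) else if j < m then pvP r j else 0) := by
        rw [pvRowP, pv_setD_map_range _ _ _ _ hmK']
      rw [e1, e2, hset1]
      rw [show pvStB t K r m = (List.range (t + 1)).map (fun i' =>
            if i' < r then pvRowF K i' else if i' = r then pvRowP K r m else List.replicate (K + 1) (0 : Int)) from rfl,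
          pv_setD_map_range _ _ _ _ hrt']
      have hgoal : (if (m : Int) ≤ (r : Int) then
          PySem.List.pySetD
            ((List.range (t + 1)).map (fun a =>
              if a = r then
                (List.range (K + 1)).map (fun j => if j = m then pvP r (m - 1) else if j < m then pvP r j else 0)
              else if a < r then pvRowF K a else if a = r then pvRowP K r m else List.replicate (K + 1) (0 : Int)))
            ((r : Int))
            (PySem.List.pySetD
              (PySem.List.pyGetD
                ((List.range (t + 1)).map (fun a =>
                  if a = r then
                    (List.range (K + 1)).map (fun j => if j = m then pvP r (m - 1) else if j < m then pvP r j else 0)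
                  else if a < r then pvRowF K a else if a = r then pvRowP K r m else List.replicate (K + 1) (0 : Int)))
                ((r : Int)) [])
              ((m : Int))
              (PySem.List.pyGetD
                  (PySem.List.pyGetD
                    ((List.range (t + 1)).map (fun a =>
                      if a = r then
                        (List.range (K + 1)).map (fun j => if j = m then pvP r (m - 1) else if j < m then pvP r j else 0)
                      else if a < r then pvRowF K a else if a = r then pvRowP K r m else List.replicate (K + 1) (0 : Int)))
                    ((r : Int)) [])
                  ((m : Int)) 0 +
                PySem.List.pyGetD
                  (PySem.List.pyGetD
                    ((List.range (t + 1)).map (fun a =>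
                      if a = r then
                        (List.range (K + 1)).map (fun j => if j = m then pvP r (m - 1) else if j < m then pvP r j else 0)
                      else if a < r then pvRowF K a else if a = r then pvRowP K r m else List.replicate (K + 1) (0 : Int)))
                    ((r : Int) - (m : Int)) [])
                  ((m : Int)) 0))
        else
          (List.range (t + 1)).map (fun a =>
            if a = r then
              (List.range (K + 1)).map (fun j => if j = m then pvP r (m - 1) else if j < m then pvP r j else 0)
            else if a < r then pvRowF K a else if a = r then pvRowP K r m else List.replicate (K + 1) (0 : Int)))
          = pvStB t K r (m + 1) := by
        by_cases hmr : m ≤ r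
        · rw [if_pos (by exact_mod_cast hmr : (m : Int) ≤ (r : Int))]
          rw [pv_getD_map_range _ _ _ _ hrt']
          simp only []
          rw [show (r : Int) - (m : Int) = ((r - m : Nat) : Int) by rw [Nat.cast_sub hmr],
              pv_getD_map_range _ _ _ _ (show r - m < t + 1 by omega)]
          simp only [show ¬(r - m = r) by omega, if_false, show r - m < r by omega, if_true]
          rw [pv_getD_map_range _ _ _ _ hmK']
          simp only []
          rw [pvRowF, pv_getD_map_range _ _ _ _ hmK']
          rw [pv_setD_map_range _ _ _ _ hmK', pv_setD_map_range _ _ _ _ hrt']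
          apply List.map_congr_left
          intro a ha
          rw [List.mem_range] at ha
          rcases eq_or_ne a r with rfl | hne
          · simp only [show ¬ a < a by omega]
            simp only [pvRowP]
            apply List.map_congr_left
            intro j hj
            rw [List.mem_range] at hj
            rcases eq_or_ne j m with rfl | hjne
            · simp [show j < j + 1 by omega, ← pvP_split a j hm1 hmr]
            · by_cases hjm : j < m
              · simp [hjne, hjm, show j < m + 1 by omega]
              · simp [hjne, hjm, show ¬ j < m + 1 by omega]
          · simp only [if_neg hne]
        · rw [if_neg (by exact_mod_cast hmr : ¬ (m : Int) ≤ (r : Int))]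
          apply List.map_congr_left
          intro a ha
          rw [List.mem_range] at ha
          rcases eq_or_ne a r with rfl | hne
          · simp only [if_neg (show ¬ a < a by omega), pvRowP]
            apply List.map_congr_left
            intro j hj
            rw [List.mem_range] at hj
            rcases eq_or_ne j m with rfl | hjne
            · have : pvP a j = pvP a (j - 1) := by
                have h2 := pvP_stab a (j - 1) (by omega)
                rw [show j - 1 + 1 = j by omega] at h2
                exact h2
              simp [show j < j + 1 by omega, ← this]
            · by_cases hjm : j < m
              · simp [hjne, hjm, show j < m + 1 by omega]
              · simp [hjne, hjm, show ¬ j < m + 1 by omega]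
          · simp only [if_neg hne]
      rw [hgoal, show (m : Int) + 1 = ((m + 1 : Nat) : Int) by push_cast; ring]
      exact ih (m + 1) (by omega) (by omega)

def pvStZ (t K m : Nat) : List (List Int) :=
  (List.range (t + 1)).map (fun i' =>
    if i' = 0 then (List.range (K + 1)).map (fun j => if j < m then (1 : Int) else 0)
    else List.replicate (K + 1) (0 : Int))

lemma pvA_base (t K : Nat) :
    ∀ (d m : Nat), K + 1 - m ≤ d →
    (PySem.List.pyRange (m : Int) ((K : Int) + 1) 1).foldl
      (fun dp j => PySem.List.pySetD dp 0 (PySem.List.pySetD (PySem.List.pyGetD dp 0 []) j 1))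
      (pvStZ t K m)
    = pvStZ t K (K + 1) := by
  intro d
  induction d with
  | zero =>
    intro m hd
    rw [PySem.List.pyRange_one_eq_nil (by exact_mod_cast (by omega : (K : Int) + 1 ≤ (m : Int)))]
    simp only [List.foldl_nil, pvStZ]
    apply List.map_congr_left
    intro a _
    rcases eq_or_ne a 0 with rfl | hne
    · simp only []
      apply List.map_congr_left
      intro j hj
      rw [List.mem_range] at hj
      simp [show j < m by omega, show j < K + 1 by omega]
    · simp [hne]
  | succ d ih =>
    intro m hd
    by_cases hmK : K + 1 ≤ m
    · rw [PySem.List.pyRange_one_eq_nil (by exact_mod_cast (by omega : (K : Int) + 1 ≤ (m : Int)))]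
      simp only [List.foldl_nil, pvStZ]
      apply List.map_congr_left
      intro a _
      rcases eq_or_ne a 0 with rfl | hne
      · simp only []
        apply List.map_congr_left
        intro j hj
        rw [List.mem_range] at hj
        simp [show j < m by omega, show j < K + 1 by omega]
      · simp [hne]
    · have hmK' : m < K + 1 := by omega
      rw [PySem.List.pyRange_one_cons (by exact_mod_cast hmK')]
      simp only [List.foldl_cons]
      have e1 : PySem.List.pyGetD (pvStZ t K m) (0 : Int) []
          = (List.range (K + 1)).map (fun j => if j < m then (1 : Int) else 0) := by
        have h := pv_getD_map_range (fun i' =>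
          if i' = 0 then (List.range (K + 1)).map (fun j => if j < m then (1 : Int) else 0)
          else List.replicate (K + 1) (0 : Int)) (t + 1) 0 [] (by omega)
        simpa using h
      have e3 := pv_setD_map_range (fun i' =>
          if i' = 0 then (List.range (K + 1)).map (fun j => if j < m then (1 : Int) else 0)
          else List.replicate (K + 1) (0 : Int)) (t + 1) 0
          ((List.range (K + 1)).map (fun j => if j = m then (1 : Int) else if j < m then 1 else 0))
          (by omega)
      rw [Nat.cast_zero] at e3
      rw [e1, pv_setD_map_range _ _ _ _ hmK']
      simp only [pvStZ]
      rw [e3]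
      have hst : (List.range (t + 1)).map (fun a =>
          if a = 0 then (List.range (K + 1)).map (fun a => if a = m then (1 : Int) else if a < m then 1 else 0)
          else if a = 0 then (List.range (K + 1)).map (fun j => if j < m then (1 : Int) else 0)
          else List.replicate (K + 1) (0 : Int)) = pvStZ t K (m + 1) := by
        apply List.map_congr_left
        intro a _
        rcases eq_or_ne a 0 with rfl | hne
        · simp only []
          apply List.map_congr_left
          intro j hj
          rcases eq_or_ne j m with rfl | hjne
          · simp [show j < j + 1 by omega]
          · by_cases hjm : j < m
            · simp [hjne, hjm, show j < m + 1 by omega]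
            · simp [hjne, hjm, show ¬ j < m + 1 by omega]
        · simp [hne]
      rw [hst, show (m : Int) + 1 = ((m + 1 : Nat) : Int) by push_cast; ring]
      exact ih (m + 1) (by omega)

lemma pvA_outer (t K : Nat) :
    ∀ (d r : Nat), 1 ≤ r → t + 1 - r ≤ d →
    (PySem.List.pyRange (r : Int) ((t : Int) + 1) 1).foldl (fun dp i =>
      (PySem.List.pyRange 1 ((K : Int) + 1) 1).foldl (fun dp j =>
        let dp := PySem.List.pySetD dp i
          (PySem.List.pySetD (PySem.List.pyGetD dp i [])
            j (PySem.List.pyGetD (PySem.List.pyGetD dp i []) (j - 1) 0))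
        if j ≤ i then
          PySem.List.pySetD dp i
            (PySem.List.pySetD (PySem.List.pyGetD dp i []) j
              (PySem.List.pyGetD (PySem.List.pyGetD dp i []) j 0 +
               PySem.List.pyGetD (PySem.List.pyGetD dp (i - j) []) j 0))
        else dp) dp) (pvStA t K r)
    = pvStA t K (t + 1) := by
  intro d
  induction d with
  | zero =>
    intro r hr1 hd
    rw [show PySem.List.pyRange (r : Int) ((t : Int) + 1) 1 = [] from
      PySem.List.pyRange_one_eq_nil (by exact_mod_cast (by omega : (t : Int) + 1 ≤ (r : Int)))]
    simp only [List.foldl_nil, pvStA]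
    apply List.map_congr_left
    intro a ha
    rw [List.mem_range] at ha
    simp [show a < r by omega, show a < t + 1 by omega]
  | succ d ih =>
    intro r hr1 hd
    by_cases hrt : t + 1 ≤ r
    · rw [show PySem.List.pyRange (r : Int) ((t : Int) + 1) 1 = [] from
        PySem.List.pyRange_one_eq_nil (by exact_mod_cast (by omega : (t : Int) + 1 ≤ (r : Int)))]
      simp only [List.foldl_nil, pvStA]
      apply List.map_congr_left
      intro a ha
      rw [List.mem_range] at ha
      simp [show a < r by omega, show a < t + 1 by omega]
    · have hrt' : r < t + 1 := by omega
      rw [show PySem.List.pyRange (r : Int) ((t : Int) + 1) 1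
            = (r : Int) :: PySem.List.pyRange ((r : Int) + 1) ((t : Int) + 1) 1 from
        PySem.List.pyRange_one_cons (by exact_mod_cast hrt')]
      simp only [List.foldl_cons]
      have hinit : pvStA t K r = pvStB t K r 1 := by
        simp only [pvStA, pvStB]
        apply List.map_congr_left
        intro a _
        rcases eq_or_ne a r with rfl | hne
        · simp only [show ¬ a < a by omega, pvRowP]
          have : (List.range (K + 1)).map (fun j => if j < 1 then pvP a j else 0)
              = (List.range (K + 1)).map (fun _ => (0 : Int)) := by
            apply List.map_congr_left
            intro j _
            rcases eq_or_ne j 0 with rfl | hj0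
            · obtain ⟨a', rfl⟩ : ∃ a', a = a' + 1 := ⟨a - 1, by omega⟩
              simp [pvP_succ_zero]
            · simp [show ¬ j < 1 by omega]
          rw [this]
          simp
        · by_cases h2 : a < r
          · simp [h2]
          · simp [h2, hne]
      have hin := pvA_inner t K r hr1 (by omega) (K + 1) 1 le_rfl (by omega)
      rw [Nat.cast_one] at hin
      rw [hinit, hin]
      have hfin : pvStB t K r (K + 1) = pvStA t K (r + 1) := by
        simp only [pvStA, pvStB, pvRowP_full K r (K + 1) le_rfl]
        apply List.map_congr_left
        intro a _
        rcases eq_or_ne a r with rfl | hne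
        · simp [show a < a + 1 by omega]
        · by_cases h2 : a < r
          · simp [h2, show a < r + 1 by omega]
          · simp [h2, hne, show ¬ a < r + 1 by omega]
      rw [hfin, show (r : Int) + 1 = ((r + 1 : Nat) : Int) by push_cast; ring]
      exact ih (r + 1) (by omega) (by omega)

lemma pvA_eval (n k : Int) (h1 : ¬(n < k ∨ k ≤ 0)) (h2 : ¬ n = k) :
    count_p_max n k = pvP (n - k).toNat k.toNat := by
  have hkK : k = ((k.toNat : Nat) : Int) := (Int.toNat_of_nonneg (by omega)).symm
  have htT : n - k = (((n - k).toNat : Nat) : Int) := (Int.toNat_of_nonneg (by omega)).symm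
  simp only [count_p_max, h1, h2, if_false]
  obtain ⟨T, hT, hT1⟩ : ∃ T : Nat, n - k = (T : Int) ∧ 1 ≤ T := ⟨(n - k).toNat, htT, by omega⟩
  obtain ⟨K, hK, hK1⟩ : ∃ K : Nat, k = (K : Int) ∧ 1 ≤ K := ⟨k.toNat, hkK, by omega⟩
  rw [hT, hK, Int.toNat_natCast, Int.toNat_natCast]
  have hdp0 : (PySem.List.pyRange 0 ((T : Int) + 1) 1).map
      (fun _ => PySem.List.pyRepeat [(0 : Int)] ((K : Int) + 1)) = pvStZ T K 0 := by
    apply List.ext_getElem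
    · simp [pvStZ, PySem.List.length_pyRange_one]
    · intro i hi1 hi2
      simp only [List.getElem_map, pvStZ, List.getElem_range]
      rw [PySem.List.pyRepeat_singleton]
      have : ((K : Int) + 1).toNat = K + 1 := by omega
      rw [this]
      rcases eq_or_ne i 0 with rfl | hne
      · simp only []
        apply List.ext_getElem
        · simp
        · intro j h3 h4
          simp
      · simp [hne]
  have hbase := pvA_base T K (K + 1) 0 (by omega)
  rw [Nat.cast_zero] at hbase
  rw [hdp0, hbase]
  have hst1 : pvStZ T K (K + 1) = pvStA T K 1 := by
    simp only [pvStZ, pvStA]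
    apply List.map_congr_left
    intro a _
    rcases eq_or_ne a 0 with rfl | hne
    · simp only [show (0 : Nat) < 1 by omega, if_true, pvRowF]
      apply List.map_congr_left
      intro j hj
      rw [List.mem_range] at hj
      simp [show j < K + 1 by omega, pvP_zero]
    · simp [hne, show ¬ a < 1 by omega]
  have houter := pvA_outer T K (T + 1) 1 le_rfl (by omega)
  rw [Nat.cast_one] at houter
  rw [hst1, houter]
  have e1 : PySem.List.pyGetD (pvStA T K (T + 1)) ((T : Nat) : Int) [] = pvRowF K T := by
    rw [pvStA, pv_getD_map_range _ _ _ _ (by omega : T < T + 1)]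
    simp [show T < T + 1 by omega]
  rw [e1, pvRowF, pv_getD_map_range _ _ _ _ (by omega : K < K + 1)]

-- ===== VERDICT (by name: the statement is the Claim_ definition above) =====
theorem count_p_max_spec : Claim_equal_count_p_max := by
  intro n k _
  unfold Spec_count_p_max
  by_cases h1 : n < k ∨ k ≤ 0
  · simp [count_p_max, count_p_max_alt, h1]
  · by_cases h2 : n = k
    · simp [count_p_max, count_p_max_alt, h2]
    · rw [pvA_eval n k h1 h2, pvB_eval n k h1 h2]
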